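-- pv_equiv track=rewrite | github.com/kaankarakose/hoi | object_interaction_detection/tracking/multi_camera_tracking/object_activeness_tracker_m.py | get_frame_sequence
-- ===== SOURCE A (Python) =====
-- def get_frame_sequence(frame_indices, start_time, duration=100):
--     """
--     Get a sequence of frames starting from start_time.
--
--     Args:
--         frame_indices: List of available frame indices (may be non-sequential)
--         start_time: Starting frame index
--         duration: Number of frames to get after start_time
--
--     Returns:
--         List of frame indices
--     """
--     # Convert to sorted list for easier handling
--     available_frames = sorted(set(frame_indices))
--
--     # Find the starting position
--     start_idx = None
--     for i, frame in enumerate(available_frames):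
--         if frame >= start_time:
--             start_idx = i
--             break
--
--     if start_idx is None:
--         return []  # No frames at or after start_time
--
--     # Get up to 'duration' frames starting from start_idx
--     selected_frames = available_frames[:start_idx + duration]
--
--     return selected_frames
-- ===== SOURCE B (Python) =====
-- def get_frame_sequence(frame_indices, start_time, duration=100):
--     """Count-based reformulation: the first qualifying position in the sorted
--     unique list is exactly the number of distinct values below start_time,
--     so no scan of the sorted list is needed."""
--     uniq = set(frame_indices)
--     if all(x < start_time for x in uniq):
--         return []
--     keep = sum(x < start_time for x in uniq) + duration
--     return sorted(uniq)[:keep]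
-- ===== Notes on version B (the rewrite author's own statement) =====
-- stated objective: alternative
-- what changed: Replaces the enumerate-scan over the sorted list (find first index with frame >= start_time, then slice) by a counting formulation: an all() emptiness test over the raw set plus a count of distinct values below start_time, which directly gives the slice bound without scanning the sorted list.
import Mathlib
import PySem

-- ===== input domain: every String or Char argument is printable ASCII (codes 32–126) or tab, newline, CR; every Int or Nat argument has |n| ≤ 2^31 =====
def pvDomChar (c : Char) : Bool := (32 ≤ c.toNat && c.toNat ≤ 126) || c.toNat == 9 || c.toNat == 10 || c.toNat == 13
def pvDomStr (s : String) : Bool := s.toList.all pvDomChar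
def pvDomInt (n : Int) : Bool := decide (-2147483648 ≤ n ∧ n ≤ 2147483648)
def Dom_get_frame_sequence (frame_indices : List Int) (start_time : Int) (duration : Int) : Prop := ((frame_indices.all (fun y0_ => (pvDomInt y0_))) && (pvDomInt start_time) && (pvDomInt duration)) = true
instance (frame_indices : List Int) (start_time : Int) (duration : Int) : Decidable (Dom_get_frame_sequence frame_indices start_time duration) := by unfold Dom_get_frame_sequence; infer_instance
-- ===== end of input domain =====

-- B replaces A's enumerate-scan for the first frame >= start_time by a count of
-- distinct values below start_time; same O(n log n) cost, different decomposition.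

-- ===== PORT A =====
-- the 'for i, frame in enumerate(available_frames): if frame >= start_time: start_idx = i; break' loop
def pvFindStart : List (Int × Int) → Int → Option Int
  | [], _ => none
  | (i, frame) :: rest, start_time =>
      if start_time ≤ frame then some i else pvFindStart rest start_time

def get_frame_sequence (frame_indices : List Int) (start_time : Int) (duration : Int) : List Int :=
  let available_frames := PySem.List.sorted (PySem.Set.ofList frame_indices) (fun x => x) false
  match pvFindStart (PySem.List.enumerate available_frames) start_time with
  | none => []
  | some start_idx => PySem.List.slice available_frames none (some (start_idx + duration))

-- ===== PORT B =====
def get_frame_sequence_alt (frame_indices : List Int) (start_time : Int) (duration : Int) : List Int :=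
  let uniq : PySem.Set Int := PySem.Set.ofList frame_indices
  if uniq.all (fun x => decide (x < start_time)) then []
  else
    let keep : Int := (uniq.countP (fun x => decide (x < start_time)) : Int) + duration
    PySem.List.slice (PySem.List.sorted uniq (fun x => x) false) none (some keep)

-- ===== PRECONDITION & SPEC =====
def Spec_get_frame_sequence (frame_indices : List Int) (start_time : Int) (duration : Int) (out : List Int) : Prop := out = get_frame_sequence_alt frame_indices start_time duration
instance (frame_indices : List Int) (start_time : Int) (duration : Int) (out : List Int) : Decidable (Spec_get_frame_sequence frame_indices start_time duration out) := by unfold Spec_get_frame_sequence; infer_instance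

-- ===== CLAIM (what is proved, stated in full; the proofs are below) =====
def Claim_equal_get_frame_sequence : Prop := ∀ (frame_indices : List Int) (start_time : Int) (duration : Int), Dom_get_frame_sequence frame_indices start_time duration → Spec_get_frame_sequence frame_indices start_time duration (get_frame_sequence frame_indices start_time duration)

-- ===== LEMMAS AND PROOFS =====

-- if every element is below start_time, the scan finds nothing
lemma pvFindStart_none (st : Int) : ∀ (l : List Int) (k : Int),
    (∀ x ∈ l, x < st) → pvFindStart (PySem.List.enumerate l k) st = none := by
  intro l
  induction l with
  | nil => intro k _; simp [PySem.List.enumerate_nil, pvFindStart]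
  | cons a t ih =>
      intro k h
      rw [PySem.List.enumerate_cons]
      have ha : a < st := h a (by simp)
      simp only [pvFindStart, if_neg (by omega : ¬ st ≤ a)]
      exact ih (k + 1) (fun x hx => h x (by simp [hx]))

-- on a sorted list with a qualifying element, the scan returns the count of elements below start_time
lemma pvFindStart_count (st : Int) : ∀ (l : List Int) (k : Int),
    l.Pairwise (· ≤ ·) → (∃ x ∈ l, st ≤ x) →
    pvFindStart (PySem.List.enumerate l k) st
      = some (k + (l.countP (fun x => decide (x < st)) : Int)) := by
  intro l
  induction l with
  | nil => intro k _ hex; simp at hex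
  | cons a t ih =>
      intro k hp hex
      rw [PySem.List.enumerate_cons]
      rcases List.pairwise_cons.mp hp with ⟨hab, hpt⟩
      by_cases hge : st ≤ a
      · simp only [pvFindStart, if_pos hge]
        have hc : (a :: t).countP (fun x => decide (x < st)) = 0 := by
          rw [List.countP_eq_zero]
          intro x hx
          rcases List.mem_cons.mp hx with rfl | hxt
          · simp; omega
          · have := hab x hxt; simp; omega
        rw [hc]; simp
      · simp only [pvFindStart, if_neg hge]
        have hex' : ∃ x ∈ t, st ≤ x := by
          rcases hex with ⟨x, hx, hstx⟩
          rcases List.mem_cons.mp hx with rfl | hxt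
          · omega
          · exact ⟨x, hxt, hstx⟩
        rw [ih (k + 1) hpt hex']
        have : (a :: t).countP (fun x => decide (x < st))
            = t.countP (fun x => decide (x < st)) + 1 := by
          rw [List.countP_cons]; simp; omega
        rw [this]
        congr 1
        push_cast
        ring

theorem get_frame_sequence_spec : Claim_equal_get_frame_sequence := by
  intro fi st du _
  unfold Spec_get_frame_sequence get_frame_sequence get_frame_sequence_alt
  have hperm : (PySem.List.sorted (PySem.Set.ofList fi) (fun x => x) false).Perm
      (PySem.Set.ofList fi) := PySem.List.sorted_perm _ _ _
  have hpair : (PySem.List.sorted (PySem.Set.ofList fi) (fun x => x) false).Pairwise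
      (fun a b => a ≤ b) := by
    simpa using PySem.List.sorted_pairwise (PySem.Set.ofList fi) (fun x => x)
  by_cases hall : (PySem.Set.ofList fi).all (fun x => decide (x < st)) = true
  · -- every element below st: scan returns none, B returns []
    have hlt : ∀ x ∈ PySem.List.sorted (PySem.Set.ofList fi) (fun x => x) false, x < st := by
      intro x hx
      have := List.all_eq_true.mp hall x (hperm.mem_iff.mp hx)
      simpa using this
    simp only [pvFindStart_none st _ 0 hlt, hall, if_true]
  · -- some element ≥ st
    have hex : ∃ x ∈ PySem.List.sorted (PySem.Set.ofList fi) (fun x => x) false, st ≤ x := by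
      simp only [List.all_eq_true, not_forall] at hall
      obtain ⟨x, hxu, hx⟩ := hall
      exact ⟨x, hperm.mem_iff.mpr hxu, by simpa using hx⟩
    have hcnt : (PySem.List.sorted (PySem.Set.ofList fi) (fun x => x) false).countP
        (fun x => decide (x < st)) = (PySem.Set.ofList fi).countP (fun x => decide (x < st)) :=
      hperm.countP_eq _
    simp only [pvFindStart_count st _ 0 hpair hex, hall, hcnt, zero_add, Bool.false_eq_true, if_false]
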